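-- pv_equiv track=rewrite | github.com/mytherapy-coding/coding | codewars/fundamentals/number_in_expanded_form/number_in_expanded_form.py | expanded_form14
-- ===== SOURCE A (Python) =====
-- def expanded_form14(num: int) -> str:
--     def gen(num: int):
--         e = 1
--         while num > 0:
--             digit = num % 10
--             num //= 10
--             if digit != 0:
--                 # e = 10**k
--                 yield str(digit * e)
--             e *= 10
--
--     return ' + '.join(reversed(list(gen(num))))
-- ===== SOURCE B (Python) =====
-- def expanded_form14(num: int) -> str:
--     if num < 0:
--         return ''
--     s = str(num)
--     return ' + '.join(d + '0' * (len(s) - i - 1)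
--                       for i, d in enumerate(s) if d != '0')
-- ===== Notes on version B (the rewrite author's own statement) =====
-- stated objective: idiomatic
-- what changed: Replaces the mod/floor-div generator loop (least-significant digit first, then reversed) by direct iteration over str(num) most-significant digit first, building each term as the digit character plus positional zero padding, with no arithmetic and no reversal.
import Mathlib
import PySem

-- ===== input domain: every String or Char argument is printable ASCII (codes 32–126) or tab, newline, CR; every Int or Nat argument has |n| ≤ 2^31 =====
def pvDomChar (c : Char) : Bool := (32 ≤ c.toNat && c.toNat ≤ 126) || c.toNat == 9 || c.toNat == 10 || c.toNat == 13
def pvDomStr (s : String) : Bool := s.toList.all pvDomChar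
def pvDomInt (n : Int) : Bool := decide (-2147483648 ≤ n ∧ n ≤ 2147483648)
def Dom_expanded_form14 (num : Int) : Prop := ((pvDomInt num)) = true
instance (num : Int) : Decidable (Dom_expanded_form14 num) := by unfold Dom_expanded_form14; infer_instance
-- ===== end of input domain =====

-- B iterates over str(num) most-significant-first, padding each nonzero digit with zeros,
-- instead of A's mod/floor-div generator followed by reversal; same return value, no speed claim.

-- ===== PORT A =====
-- the inner generator 'gen': yields str(digit * e) for each nonzero digit, least significant first
def expandedGen (num : Int) (e : Int) : List String :=
  if _h : num > 0 then
    let digit := PySem.Int.mod num 10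
    let num' := PySem.Int.floordiv num 10
    (if digit ≠ 0 then [PySem.Int.toStr (digit * e)] else []) ++ expandedGen num' (e * 10)
  else []
termination_by num.toNat
decreasing_by
  rw [PySem.Int.floordiv_eq_ediv_of_pos (by norm_num)]
  omega

def expanded_form14 (num : Int) : String :=
  PySem.Str.join " + " (expandedGen num 1).reverse

-- ===== PORT B =====
def expanded_form14_alt (num : Int) : String :=
  if num < 0 then "" else
    let s := PySem.Int.toStr num
    PySem.Str.join " + "
      ((PySem.List.enumerate s.toList).filterMap fun p =>
        if p.2 ≠ '0' then
          some (String.ofList (p.2 :: List.replicate (PySem.Str.len s - p.1 - 1).toNat '0'))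
        else none)

-- ===== PRECONDITION & SPEC =====
def Spec_expanded_form14 (num : Int) (out : String) : Prop := out = expanded_form14_alt num
instance (num : Int) (out : String) : Decidable (Spec_expanded_form14 num out) := by unfold Spec_expanded_form14; infer_instance

-- ===== CLAIM (what is proved, stated in full; the proofs are below) =====
def Claim_equal_expanded_form14 : Prop := ∀ (num : Int), Dom_expanded_form14 num → Spec_expanded_form14 num (expanded_form14 num)

-- ===== LEMMAS AND PROOFS =====

-- common shape: terms most-significant-first over a digit list, each padded by (tail length + off) zeros
def termsMSB (ds : List Nat) (off : Nat) : List String :=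
  match ds with
  | [] => []
  | d :: t =>
    (if d ≠ 0 then [String.ofList (Nat.digitChar d :: List.replicate (t.length + off) '0')] else [])
      ++ termsMSB t off

-- A-side terms, least-significant-first with exponent k for the head digit
def termsLSB (ds : List Nat) (k : Nat) : List String :=
  match ds with
  | [] => []
  | d :: t =>
    (if d ≠ 0 then [PySem.Int.toStr ((d : Int) * (10 : Int) ^ k)] else []) ++ termsLSB t (k + 1)

theorem digits_mul_pow (d k : Nat) (hd1 : 1 ≤ d) (hd9 : d < 10) :
    Nat.digits 10 (d * 10 ^ k) = List.replicate k 0 ++ [d] := by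
  induction k with
  | zero =>
    simp only [pow_zero, Nat.mul_one]
    rw [Nat.digits_def' (by norm_num) (by omega), Nat.mod_eq_of_lt hd9, Nat.div_eq_of_lt hd9]
    simp
  | succ k ih =>
    rw [Nat.digits_def' (by norm_num) (by positivity)]
    have h1 : d * 10 ^ (k + 1) % 10 = 0 := by
      rw [pow_succ, ← Nat.mul_assoc]
      exact Nat.mul_mod_left _ _
    have h2 : d * 10 ^ (k + 1) / 10 = d * 10 ^ k := by
      rw [pow_succ, ← Nat.mul_assoc]
      exact Nat.mul_div_cancel _ (by norm_num)
    rw [h1, h2, ih]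
    simp [List.replicate_succ]

theorem toDigitsCore_acc (b f : Nat) : ∀ (n : Nat) (l : List Char),
    Nat.toDigitsCore b f n l = Nat.toDigitsCore b f n [] ++ l := by
  induction f with
  | zero => intro n l; simp [Nat.toDigitsCore]
  | succ f ih =>
    intro n l
    simp only [Nat.toDigitsCore]
    split
    · simp
    · rw [ih (n / b) [Nat.digitChar (n % b)], ih (n / b) (Nat.digitChar (n % b) :: l)]
      simp

theorem toDigitsCore_eq (f : Nat) : ∀ (n : Nat), 0 < n → n < f →
    Nat.toDigitsCore 10 f n [] = ((Nat.digits 10 n).reverse.map Nat.digitChar) := by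
  induction f with
  | zero => intro n hn hf; omega
  | succ f ih =>
    intro n hn hf
    simp only [Nat.toDigitsCore]
    by_cases h : n / 10 = 0
    · have hlt : n < 10 := by omega
      rw [if_pos h, Nat.digits_def' (by norm_num) hn, Nat.mod_eq_of_lt hlt, h]
      simp
    · rw [if_neg h, toDigitsCore_acc, ih (n / 10) (by omega) (by omega),
        Nat.digits_def' (by norm_num) hn]
      simp

theorem toDigits_eq (n : Nat) (hn : 0 < n) :
    Nat.toDigits 10 n = ((Nat.digits 10 n).reverse.map Nat.digitChar) :=
  toDigitsCore_eq (n + 1) n hn (by omega)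

theorem toStr_digit_pow (d k : Nat) (hd1 : 1 ≤ d) (hd9 : d < 10) :
    PySem.Int.toStr ((d : Int) * (10 : Int) ^ k)
      = String.ofList (Nat.digitChar d :: List.replicate k '0') := by
  have hcast : (d : Int) * (10 : Int) ^ k = ((d * 10 ^ k : Nat) : Int) := by push_cast; ring
  have hpos : 0 < d * 10 ^ k := by positivity
  rw [hcast]
  show String.ofList (PySem.Int.toChars _) = _
  rw [PySem.Int.toChars]
  rw [if_neg (by omega)]
  rw [Int.toNat_natCast, toDigits_eq _ hpos, digits_mul_pow d k hd1 hd9]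
  simp [show Nat.digitChar 0 = '0' from rfl]

theorem digitChar_eq_zero_iff (d : Nat) (hd : d < 10) :
    (Nat.digitChar d = '0') ↔ d = 0 := by
  interval_cases d <;> simp [Nat.digitChar]

theorem termsMSB_append (l : List Nat) (d : Nat) (off : Nat) :
    termsMSB (l ++ [d]) off
      = termsMSB l (off + 1)
        ++ (if d ≠ 0 then [String.ofList (Nat.digitChar d :: List.replicate off '0')] else []) := by
  induction l with
  | nil => simp [termsMSB]
  | cons x t ih =>
    simp only [List.cons_append, termsMSB, ih, List.append_assoc]
    have h : (t ++ [d]).length + off = t.length + (off + 1) := by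
      simp only [List.length_append, List.length_cons, List.length_nil]
      omega
    rw [h]

theorem termsLSB_reverse (ds : List Nat) (k : Nat) (hds : ∀ x ∈ ds, x < 10) :
    (termsLSB ds k).reverse = termsMSB ds.reverse k := by
  induction ds generalizing k with
  | nil => simp [termsLSB, termsMSB]
  | cons d t ih =>
    simp only [termsLSB, List.reverse_append, List.reverse_cons, termsMSB_append,
      ih (k + 1) (fun x hx => hds x (List.mem_cons_of_mem _ hx))]
    by_cases hz : d = 0
    · simp [hz]
    · rw [if_pos hz, if_pos hz, toStr_digit_pow d k (by omega) (hds d List.mem_cons_self)]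
      simp

theorem gen_eq_termsLSB (n : Nat) (k : Nat) :
    expandedGen (n : Int) ((10 : Int) ^ k) = termsLSB (Nat.digits 10 n) k := by
  induction n using Nat.strong_induction_on generalizing k with
  | _ n ih =>
    rw [expandedGen]
    by_cases hn : 0 < n
    · rw [dif_pos (by exact_mod_cast hn)]
      have hmod : PySem.Int.mod (n : Int) 10 = ((n % 10 : Nat) : Int) := by
        exact_mod_cast PySem.Int.mod_natCast n 10
      have hdiv : PySem.Int.floordiv (n : Int) 10 = ((n / 10 : Nat) : Int) := by
        exact_mod_cast PySem.Int.floordiv_natCast n 10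
      have hpow : (10 : Int) ^ k * 10 = (10 : Int) ^ (k + 1) := by ring
      simp only [hmod, hdiv, hpow, ih (n / 10) (by omega) (k + 1)]
      rw [Nat.digits_def' (by norm_num) hn]
      simp only [termsLSB]
      congr 1
      by_cases hz : n % 10 = 0
      · simp [hz]
      · rw [if_pos (by exact_mod_cast hz), if_pos hz]
    · have h0 : n = 0 := by omega
      subst h0
      simp [termsLSB]

-- B-side: the enumerate/filterMap over the digit characters equals termsMSB with offset 0
theorem enum_filterMap_eq (R : List Nat) (i L : Int)
    (hR : ∀ d ∈ R, d < 10) (hi : i + (R.length : Int) = L) :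
    ((PySem.List.enumerate (R.map Nat.digitChar) i).filterMap fun p =>
        if p.2 ≠ '0' then
          some (String.ofList (p.2 :: List.replicate (L - p.1 - 1).toNat '0'))
        else none)
      = termsMSB R 0 := by
  induction R generalizing i with
  | nil => simp [termsMSB]
  | cons d t ih =>
    simp only [List.map_cons, PySem.List.enumerate, List.filterMap_cons, termsMSB]
    have hlen : (L - i - 1).toNat = t.length := by
      simp only [List.length_cons] at hi
      omega
    have hrec := ih (i + 1) (fun x hx => hR x (List.mem_cons_of_mem _ hx))
      (by simp at hi ⊢; omega)
    by_cases hz : d = 0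
    · subst hz
      rw [show Nat.digitChar 0 = '0' from rfl, if_neg (by simp), hrec]
      simp
    · rw [if_pos (by simpa [digitChar_eq_zero_iff d (hR d (List.mem_cons_self))]),
        hrec, hlen]
      simp [hz]

theorem digits_lt_ten (n : Nat) : ∀ d ∈ (Nat.digits 10 n).reverse, d < 10 := by
  intro d hd
  exact Nat.digits_lt_base (by norm_num) (List.mem_reverse.mp hd)

-- ===== VERDICT (by name: the statement is the Claim_ definition above) =====
theorem expanded_form14_spec : Claim_equal_expanded_form14 := by
  intro num _
  unfold Spec_expanded_form14 expanded_form14 expanded_form14_alt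
  by_cases hneg : num < 0
  · rw [if_pos hneg, expandedGen, dif_neg (by omega)]
    decide
  · rw [if_neg hneg]
    by_cases h0 : num = 0
    · subst h0
      rw [expandedGen, dif_neg (by omega)]
      decide
    · have hpos : 0 < num := by omega
      obtain ⟨n, rfl⟩ : ∃ n : Nat, num = (n : Int) := ⟨num.toNat, by omega⟩
      have hn : 0 < n := by exact_mod_cast hpos
      have hs : (PySem.Int.toStr (n : Int)).toList
          = (Nat.digits 10 n).reverse.map Nat.digitChar := by
        rw [PySem.Int.toList_toStr, PySem.Int.toChars, if_neg (by omega),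
          Int.toNat_natCast, toDigits_eq n hn]
      have hlen : PySem.Str.len (PySem.Int.toStr (n : Int))
          = ((Nat.digits 10 n).reverse.length : Int) := by
        rw [PySem.Str.len_eq, hs]
        simp
      have hone : (1 : Int) = (10 : Int) ^ 0 := by norm_num
      rw [hone, gen_eq_termsLSB n 0,
        termsLSB_reverse _ 0 (fun x hx => Nat.digits_lt_base (by norm_num) hx)]
      congr 1
      rw [hs, hlen]
      exact (enum_filterMap_eq _ 0 _ (digits_lt_ten n) (by simp)).symm
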